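-- pv_equiv track=rewrite | github.com/atcfu/taac_2026-puiching-memory | src/taac2026/reporting/dataset_eda.py | compute_cardinality_bins
-- ===== SOURCE A (Python) =====
-- from typing import Any, Iterable, Sequence
--
-- def compute_cardinality_bins(ranking: list[dict[str, Any]]) -> dict[str, int]:
--     """Bin features by cardinality ranges."""
--     bins = {"1-10": 0, "11-100": 0, "101-1K": 0, "1K-10K": 0, "10K-100K": 0, "100K+": 0}
--     for r in ranking:
--         c = r.get("n_unique", 0)
--         if c <= 0:
--             continue
--         if c <= 10:
--             bins["1-10"] += 1
--         elif c <= 100: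
--             bins["11-100"] += 1
--         elif c <= 1000:
--             bins["101-1K"] += 1
--         elif c <= 10000:
--             bins["1K-10K"] += 1
--         elif c <= 100000:
--             bins["10K-100K"] += 1
--         else:
--             bins["100K+"] += 1
--     return bins
-- ===== SOURCE B (Python) =====
-- def compute_cardinality_bins(ranking):
--     # Staged: extract all cardinalities once, then one counting pass per bin.
--     cs = [r.get("n_unique", 0) for r in ranking]
--     edges = [0, 10, 100, 1000, 10000, 100000, None]
--     labels = ["1-10", "11-100", "101-1K", "1K-10K", "10K-100K", "100K+"]
--     out = {}
--     for i, lab in enumerate(labels):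
--         lo, hi = edges[i], edges[i + 1]
--         out[lab] = sum(1 for c in cs if c > lo and (hi is None or c <= hi))
--     return out
-- ===== Notes on version B (the rewrite author's own statement) =====
-- stated objective: alternative
-- what changed: Replaces A's single pass with a six-way if/elif branch ladder updating a dict by a staged design: one pass extracts all cardinalities, then each bin's count is computed by its own filtering pass over that list (one per (lo,hi] edge pair), and the dict is built once at the end.
import Mathlib
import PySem

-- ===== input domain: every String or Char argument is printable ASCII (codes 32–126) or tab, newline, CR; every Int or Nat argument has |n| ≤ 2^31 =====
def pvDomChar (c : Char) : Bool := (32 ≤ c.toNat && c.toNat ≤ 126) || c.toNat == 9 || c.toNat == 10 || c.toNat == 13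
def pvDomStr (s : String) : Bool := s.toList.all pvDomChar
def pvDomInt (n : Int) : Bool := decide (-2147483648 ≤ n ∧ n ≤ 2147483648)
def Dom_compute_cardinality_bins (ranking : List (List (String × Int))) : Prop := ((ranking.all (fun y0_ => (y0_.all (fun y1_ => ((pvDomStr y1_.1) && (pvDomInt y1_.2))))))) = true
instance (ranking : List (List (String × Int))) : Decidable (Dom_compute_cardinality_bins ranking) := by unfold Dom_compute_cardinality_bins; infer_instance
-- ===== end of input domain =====

-- B replaces A's single-pass branch-ladder histogram by a staged design: extract the cardinalities once, then one filtering pass per bin (alternative decomposition; return value only).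

-- ===== PORT A =====
-- one iteration of A's loop body
def cbStepA (bins : PySem.Dict String Int) (r : List (String × Int)) : PySem.Dict String Int :=
  let c := (PySem.Dict.mk r).getD "n_unique" 0
  if c ≤ 0 then bins
  else if c ≤ 10 then bins.modify "1-10" 0 (· + 1)
  else if c ≤ 100 then bins.modify "11-100" 0 (· + 1)
  else if c ≤ 1000 then bins.modify "101-1K" 0 (· + 1)
  else if c ≤ 10000 then bins.modify "1K-10K" 0 (· + 1)
  else if c ≤ 100000 then bins.modify "10K-100K" 0 (· + 1)
  else bins.modify "100K+" 0 (· + 1)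

def compute_cardinality_bins (ranking : List (List (String × Int))) : List (String × Int) :=
  (ranking.foldl cbStepA
    (PySem.Dict.ofList [("1-10", 0), ("11-100", 0), ("101-1K", 0), ("1K-10K", 0), ("10K-100K", 0), ("100K+", 0)])).items

-- ===== PORT B =====
-- sum(1 for c in cs if c > lo and (hi is None or c <= hi))
def cbBinCount (lo : Int) (hi : Option Int) (cs : List Int) : Int :=
  ((cs.filter (fun c => decide (lo < c) && (match hi with | none => true | some h => decide (c ≤ h)))).length : Int)

-- B: cs extracted once; then one counting pass per (lo, hi] edge pair, dict built in the label loop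
def compute_cardinality_bins_alt (ranking : List (List (String × Int))) : List (String × Int) :=
  let cs := ranking.map (fun r => (PySem.Dict.mk r).getD "n_unique" 0)
  let edges : List (Option Int) := [some 0, some 10, some 100, some 1000, some 10000, some 100000, none]
  let labels : List String := ["1-10", "11-100", "101-1K", "1K-10K", "10K-100K", "100K+"]
  ((PySem.List.enumerate labels 0).foldl
    (fun (out : PySem.Dict String Int) p =>
      let lo := (edges.getD p.1.toNat none).getD 0
      let hi := edges.getD (p.1.toNat + 1) none
      out.insert p.2 (cbBinCount lo hi cs))
    (PySem.Dict.mk [])).items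

-- ===== PRECONDITION & SPEC =====
def Spec_compute_cardinality_bins (ranking : List (List (String × Int))) (out : List (String × Int)) : Prop := out = compute_cardinality_bins_alt ranking
instance (ranking : List (List (String × Int))) (out : List (String × Int)) : Decidable (Spec_compute_cardinality_bins ranking out) := by unfold Spec_compute_cardinality_bins; infer_instance

-- ===== CLAIM (what is proved, stated in full; the proofs are below) =====
def Claim_equal_compute_cardinality_bins : Prop := ∀ (ranking : List (List (String × Int))), Dom_compute_cardinality_bins ranking → Spec_compute_cardinality_bins ranking (compute_cardinality_bins ranking)

-- ===== LEMMAS AND PROOFS =====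

def cbVal (r : List (String × Int)) : Int := (PySem.Dict.mk r).getD "n_unique" 0

def cbMk (l : List Int) : PySem.Dict String Int :=
  PySem.Dict.mk ((["1-10", "11-100", "101-1K", "1K-10K", "10K-100K", "100K+"]).zip l)


lemma cbStepA_eq (bins : PySem.Dict String Int) (r : List (String × Int)) :
    cbStepA bins r =
      (if cbVal r ≤ 0 then bins
       else if cbVal r ≤ 10 then bins.modify "1-10" 0 (· + 1)
       else if cbVal r ≤ 100 then bins.modify "11-100" 0 (· + 1)
       else if cbVal r ≤ 1000 then bins.modify "101-1K" 0 (· + 1)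
       else if cbVal r ≤ 10000 then bins.modify "1K-10K" 0 (· + 1)
       else if cbVal r ≤ 100000 then bins.modify "10K-100K" 0 (· + 1)
       else bins.modify "100K+" 0 (· + 1)) := rfl

lemma cbBinCount_cons (lo : Int) (hi : Option Int) (v : Int) (cs : List Int) :
    cbBinCount lo hi (v :: cs) =
      (if (decide (lo < v) && (match hi with | none => true | some h => decide (v ≤ h))) = true
       then 1 else 0) + cbBinCount lo hi cs := by
  unfold cbBinCount
  rw [List.filter_cons]
  split_ifs with h
  · simp; omega
  · simp

lemma cbFoldA (rs : List (List (String × Int))) : ∀ (a b c d e f : Int),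
    rs.foldl cbStepA (cbMk [a, b, c, d, e, f]) =
      cbMk [a + cbBinCount 0 (some 10) (rs.map cbVal),
            b + cbBinCount 10 (some 100) (rs.map cbVal),
            c + cbBinCount 100 (some 1000) (rs.map cbVal),
            d + cbBinCount 1000 (some 10000) (rs.map cbVal),
            e + cbBinCount 10000 (some 100000) (rs.map cbVal),
            f + cbBinCount 100000 none (rs.map cbVal)] := by
  induction rs with
  | nil => intro a b c d e f; simp [cbBinCount]
  | cons r rs ih =>
      intro a b c d e f
      rw [List.foldl_cons, List.map_cons]
      by_cases h0 : cbVal r ≤ 0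
      · have hstep : cbStepA (cbMk [a, b, c, d, e, f]) r = cbMk [a, b, c, d, e, f] := by
          rw [cbStepA_eq, if_pos h0]
        rw [hstep, ih]
        unfold cbMk
        congr 1
        simp only [cbBinCount_cons]
        simp [show ¬(0:Int) < cbVal r from by omega, show ¬(10:Int) < cbVal r from by omega, show ¬(100:Int) < cbVal r from by omega, show ¬(1000:Int) < cbVal r from by omega, show ¬(10000:Int) < cbVal r from by omega, show ¬(100000:Int) < cbVal r from by omega]
      by_cases h1 : cbVal r ≤ 10
      · have hstep : cbStepA (cbMk [a, b, c, d, e, f]) r = cbMk [a + 1, b, c, d, e, f] := by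
          rw [cbStepA_eq, if_neg h0, if_pos h1]; rfl
        rw [hstep, ih]
        unfold cbMk
        congr 1
        simp only [cbBinCount_cons]
        simp [show (0:Int) < cbVal r from by omega, show ¬(10:Int) < cbVal r from by omega, show ¬(100:Int) < cbVal r from by omega, show ¬(1000:Int) < cbVal r from by omega, show ¬(10000:Int) < cbVal r from by omega, show ¬(100000:Int) < cbVal r from by omega, show cbVal r ≤ (10:Int) from by omega]
        all_goals omega
      by_cases h2 : cbVal r ≤ 100
      · have hstep : cbStepA (cbMk [a, b, c, d, e, f]) r = cbMk [a, b + 1, c, d, e, f] := by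
          rw [cbStepA_eq, if_neg h0, if_neg h1, if_pos h2]; rfl
        rw [hstep, ih]
        unfold cbMk
        congr 1
        simp only [cbBinCount_cons]
        simp [show (0:Int) < cbVal r from by omega, show (10:Int) < cbVal r from by omega, show ¬(100:Int) < cbVal r from by omega, show ¬(1000:Int) < cbVal r from by omega, show ¬(10000:Int) < cbVal r from by omega, show ¬(100000:Int) < cbVal r from by omega, show ¬cbVal r ≤ (10:Int) from by omega, show cbVal r ≤ (100:Int) from by omega]
        all_goals omega
      by_cases h3 : cbVal r ≤ 1000
      · have hstep : cbStepA (cbMk [a, b, c, d, e, f]) r = cbMk [a, b, c + 1, d, e, f] := by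
          rw [cbStepA_eq, if_neg h0, if_neg h1, if_neg h2, if_pos h3]; rfl
        rw [hstep, ih]
        unfold cbMk
        congr 1
        simp only [cbBinCount_cons]
        simp [show (0:Int) < cbVal r from by omega, show (10:Int) < cbVal r from by omega, show (100:Int) < cbVal r from by omega, show ¬(1000:Int) < cbVal r from by omega, show ¬(10000:Int) < cbVal r from by omega, show ¬(100000:Int) < cbVal r from by omega, show ¬cbVal r ≤ (10:Int) from by omega, show ¬cbVal r ≤ (100:Int) from by omega, show cbVal r ≤ (1000:Int) from by omega]
        all_goals omega
      by_cases h4 : cbVal r ≤ 10000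
      · have hstep : cbStepA (cbMk [a, b, c, d, e, f]) r = cbMk [a, b, c, d + 1, e, f] := by
          rw [cbStepA_eq, if_neg h0, if_neg h1, if_neg h2, if_neg h3, if_pos h4]; rfl
        rw [hstep, ih]
        unfold cbMk
        congr 1
        simp only [cbBinCount_cons]
        simp [show (0:Int) < cbVal r from by omega, show (10:Int) < cbVal r from by omega, show (100:Int) < cbVal r from by omega, show (1000:Int) < cbVal r from by omega, show ¬(10000:Int) < cbVal r from by omega, show ¬(100000:Int) < cbVal r from by omega, show ¬cbVal r ≤ (10:Int) from by omega, show ¬cbVal r ≤ (100:Int) from by omega, show ¬cbVal r ≤ (1000:Int) from by omega, show cbVal r ≤ (10000:Int) from by omega]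
        all_goals omega
      by_cases h5 : cbVal r ≤ 100000
      · have hstep : cbStepA (cbMk [a, b, c, d, e, f]) r = cbMk [a, b, c, d, e + 1, f] := by
          rw [cbStepA_eq, if_neg h0, if_neg h1, if_neg h2, if_neg h3, if_neg h4, if_pos h5]; rfl
        rw [hstep, ih]
        unfold cbMk
        congr 1
        simp only [cbBinCount_cons]
        simp [show (0:Int) < cbVal r from by omega, show (10:Int) < cbVal r from by omega, show (100:Int) < cbVal r from by omega, show (1000:Int) < cbVal r from by omega, show (10000:Int) < cbVal r from by omega, show ¬(100000:Int) < cbVal r from by omega, show ¬cbVal r ≤ (10:Int) from by omega, show ¬cbVal r ≤ (100:Int) from by omega, show ¬cbVal r ≤ (1000:Int) from by omega, show ¬cbVal r ≤ (10000:Int) from by omega, show cbVal r ≤ (100000:Int) from by omega]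
        all_goals omega
      have hstep : cbStepA (cbMk [a, b, c, d, e, f]) r = cbMk [a, b, c, d, e, f + 1] := by
        rw [cbStepA_eq, if_neg h0, if_neg h1, if_neg h2, if_neg h3, if_neg h4, if_neg h5]; rfl
      rw [hstep, ih]
      unfold cbMk
      congr 1
      simp only [cbBinCount_cons]
      simp [show (0:Int) < cbVal r from by omega, show (10:Int) < cbVal r from by omega, show (100:Int) < cbVal r from by omega, show (1000:Int) < cbVal r from by omega, show (10000:Int) < cbVal r from by omega, show (100000:Int) < cbVal r from by omega, show ¬cbVal r ≤ (10:Int) from by omega, show ¬cbVal r ≤ (100:Int) from by omega, show ¬cbVal r ≤ (1000:Int) from by omega, show ¬cbVal r ≤ (10000:Int) from by omega, show ¬cbVal r ≤ (100000:Int) from by omega]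
      all_goals omega

-- ===== VERDICT (by name: the statement is the Claim_ definition above) =====
theorem compute_cardinality_bins_spec : Claim_equal_compute_cardinality_bins := by
  intro ranking _
  unfold Spec_compute_cardinality_bins compute_cardinality_bins compute_cardinality_bins_alt
  have hinit : PySem.Dict.ofList
      ([("1-10", 0), ("11-100", 0), ("101-1K", 0), ("1K-10K", 0), ("10K-100K", 0), ("100K+", 0)] : List (String × Int))
      = cbMk [0, 0, 0, 0, 0, 0] := by decide
  rw [hinit, cbFoldA]
  simp only [zero_add]
  rfl
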